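-- pv_equiv track=rewrite | github.com/mfitz/knacktorle | movie_clues.py | make_movie_title_word_regex
-- ===== SOURCE A (Python) =====
-- def make_movie_title_word_regex(movie_title_word):
--     alnum_character_count = 0
--     alnum_character_pattern = "\\w"
--     word_regex = ''
--     for character in movie_title_word:
--         if character.isalnum():
--             alnum_character_count += 1
--         else:
--             if alnum_character_count != 0:
--                 word_regex += "{}{{{}}}".format(alnum_character_pattern, alnum_character_count)
--             word_regex += "\\{}".format(character)
--             alnum_character_count = 0
--     if alnum_character_count != 0:
--         word_regex += "{}{{{}}}".format(alnum_character_pattern, alnum_character_count)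
--     return word_regex
-- ===== SOURCE B (Python) =====
-- def make_movie_title_word_regex(movie_title_word):
--     seps = [(i, c) for i, c in enumerate(movie_title_word) if not c.isalnum()]
--     frags = []
--     prev = -1
--     for i, c in seps:
--         if i - prev > 1:
--             frags.append("\\w{{{}}}".format(i - prev - 1))
--         frags.append("\\" + c)
--         prev = i
--     if len(movie_title_word) - prev > 1:
--         frags.append("\\w{{{}}}".format(len(movie_title_word) - prev - 1))
--     return ''.join(frags)
-- ===== Notes on version B (the rewrite author's own statement) =====
-- stated objective: alternative
-- what changed: B first collects the positions of all non-alnum characters with an enumerate-filter pass, then iterates over those separators only, deriving each \w{n} run length as the arithmetic difference of consecutive separator indices instead of A's per-character counter with flushes.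
import Mathlib
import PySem

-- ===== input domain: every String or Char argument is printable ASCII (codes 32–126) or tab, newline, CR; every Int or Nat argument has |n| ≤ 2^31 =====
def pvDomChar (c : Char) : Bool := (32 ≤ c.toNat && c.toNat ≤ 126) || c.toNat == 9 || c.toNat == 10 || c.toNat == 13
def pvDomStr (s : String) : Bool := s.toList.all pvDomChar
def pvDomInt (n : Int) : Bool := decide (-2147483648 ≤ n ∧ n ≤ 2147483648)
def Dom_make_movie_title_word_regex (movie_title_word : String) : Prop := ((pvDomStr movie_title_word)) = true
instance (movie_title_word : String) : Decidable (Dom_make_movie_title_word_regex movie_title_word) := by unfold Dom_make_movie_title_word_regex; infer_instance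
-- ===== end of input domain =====

-- B replaces A's per-character counter loop by a separator-position algorithm: collect the
-- indices of non-alnum characters, then derive each \w{n} length as the difference of
-- consecutive separator indices; same cost, no speed claim.

-- ===== PORT A =====
-- "{}{{{}}}".format("\\w", n) : the "\w{n}" fragment
def pvWFrag (n : Int) : List Char := '\\' :: 'w' :: '{' :: ((PySem.Int.toStr n).toList ++ ['}'])

-- the for loop of A, state = (alnum_character_count, word_regex); the base case is the post-loop flush
def pvALoop (cnt : Int) (acc : List Char) : List Char → List Char
  | [] => if cnt ≠ 0 then acc ++ pvWFrag cnt else acc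
  | c :: cs =>
    if PySem.Chars.isalnum c then
      pvALoop (cnt + 1) acc cs
    else
      pvALoop 0 ((if cnt ≠ 0 then acc ++ pvWFrag cnt else acc) ++ ['\\', c]) cs

def make_movie_title_word_regex (movie_title_word : String) : String :=
  String.mk (pvALoop 0 [] movie_title_word.toList)

-- ===== PORT B =====
-- seps = [(i, c) for i, c in enumerate(movie_title_word) if not c.isalnum()]
def pvSeps (l : List Char) : List (Int × Char) :=
  (PySem.List.enumerate l).filter (fun p => !PySem.Chars.isalnum p.2)

-- the for loop over seps, state = (prev, frags); base case = the post-loop trailing-run check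
def pvBLoop (n : Int) (prev : Int) (frags : List Char) : List (Int × Char) → List Char
  | [] => if n - prev > 1 then frags ++ pvWFrag (n - prev - 1) else frags
  | (i, c) :: rest =>
      pvBLoop n i
        ((if i - prev > 1 then frags ++ pvWFrag (i - prev - 1) else frags) ++ ['\\', c]) rest

def make_movie_title_word_regex_alt (movie_title_word : String) : String :=
  String.mk (pvBLoop (movie_title_word.toList.length : Int) (-1) [] (pvSeps movie_title_word.toList))

-- ===== PRECONDITION & SPEC =====
def Spec_make_movie_title_word_regex (movie_title_word : String) (out : String) : Prop := out = make_movie_title_word_regex_alt movie_title_word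
instance (movie_title_word : String) (out : String) : Decidable (Spec_make_movie_title_word_regex movie_title_word out) := by unfold Spec_make_movie_title_word_regex; infer_instance

-- ===== CLAIM =====
def Claim_equal_make_movie_title_word_regex : Prop := ∀ (movie_title_word : String), Dom_make_movie_title_word_regex movie_title_word → Spec_make_movie_title_word_regex movie_title_word (make_movie_title_word_regex movie_title_word)

-- ===== LEMMAS AND PROOFS =====

-- seps of l enumerated from start index k
def pvSepsFrom (k : Int) (l : List Char) : List (Int × Char) :=
  (PySem.List.enumerate l k).filter (fun p => !PySem.Chars.isalnum p.2)

lemma pvSepsFrom_cons (k : Int) (c : Char) (cs : List Char) :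
    pvSepsFrom k (c :: cs)
      = (if PySem.Chars.isalnum c then [] else [(k, c)]) ++ pvSepsFrom (k + 1) cs := by
  simp only [pvSepsFrom, PySem.List.enumerate_cons, List.filter_cons]
  cases h : PySem.Chars.isalnum c <;> simp

-- loop invariant: A's loop from state (cnt, acc) at absolute position k equals B's render loop
-- over the remaining separators, with prev = k - cnt - 1 (the index of the last separator).
lemma pvALoop_eq (l : List Char) : ∀ (k cnt : Int) (acc : List Char), 0 ≤ cnt →
    pvALoop cnt acc l = pvBLoop (k + (l.length : Int)) (k - cnt - 1) acc (pvSepsFrom k l) := by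
  induction l with
  | nil =>
    intro k cnt acc hc
    simp only [pvSepsFrom, PySem.List.enumerate_nil, List.filter_nil, List.length_nil,
      Nat.cast_zero, add_zero]
    rw [pvALoop, pvBLoop]
    have h3 : k - (k - cnt - 1) - 1 = cnt := by ring
    rw [h3]
    exact (if_congr (by omega) rfl rfl).symm
  | cons c cs ih =>
    intro k cnt acc hc
    rw [pvALoop, pvSepsFrom_cons]
    cases h : PySem.Chars.isalnum c with
    | true =>
      simp only [if_true, List.nil_append]
      rw [ih (k + 1) (cnt + 1) acc (by omega)]
      have h1 : k + 1 + (cs.length : Int) = k + ((c :: cs).length : Int) := by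
        simp [List.length_cons]; ring
      have h2 : k + 1 - (cnt + 1) - 1 = k - cnt - 1 := by ring
      rw [h1, h2]
    | false =>
      simp only [Bool.false_eq_true, if_false, List.singleton_append]
      rw [ih (k + 1) 0 _ (by omega)]
      rw [pvBLoop]
      have h1 : k + 1 + (cs.length : Int) = k + ((c :: cs).length : Int) := by
        simp [List.length_cons]; ring
      have h2 : k + 1 - 0 - 1 = k := by ring
      have h3 : k - (k - cnt - 1) - 1 = cnt := by ring
      have h4 : (if cnt ≠ 0 then acc ++ pvWFrag cnt else acc)
          = (if k - (k - cnt - 1) > 1 then acc ++ pvWFrag (k - (k - cnt - 1) - 1) else acc) := by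
        rw [h3]; exact (if_congr (by omega) rfl rfl)
      rw [h1, h2, h4]

-- ===== VERDICT =====
theorem make_movie_title_word_regex_spec : Claim_equal_make_movie_title_word_regex := by
  intro s _
  show _ = _
  rw [make_movie_title_word_regex, make_movie_title_word_regex_alt]
  rw [pvALoop_eq s.toList 0 0 [] le_rfl]
  norm_num
  rfl
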